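-- pv_equiv track=rewrite | github.com/kool7/Data_Structures_And_Algorithms | Hackerrank/compete/digitalboard.py | diff_between_vertical_and_horizontal_lines
-- ===== SOURCE A (Python) =====
-- def diff_between_vertical_and_horizontal_lines(number):
--     dict_hori = {'0': 2, '1': 0, '2': 3, '3': 3, '4': 1, '5': 3, '6': 3,
--                  '7': 1, '8': 3, '9': 3}
--     dict_verti = {'0': 4, '1': 2, '2': 2, '3': 2, '4': 3, '5': 2, '6': 3,
--                  '7': 2, '8': 4, '9': 3}
--
--     hori_sum, verti_sum = 0, 0
--
--     for digit in number:
--         hori = dict_hori[digit]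
--         verti = dict_verti[digit]
--
--         hori_sum += hori
--         verti_sum += verti
--
--     return verti_sum - hori_sum
-- ===== SOURCE B (Python) =====
-- def diff_between_vertical_and_horizontal_lines(number):
--     # weight per digit = vertical segment count minus horizontal segment count
--     weight = {'0': 2, '1': 2, '2': -1, '3': -1, '4': 2,
--               '5': -1, '6': 0, '7': 1, '8': 1, '9': 0}
--
--     counts = {}
--     for digit in number:
--         counts[digit] = counts.get(digit, 0) + 1
--
--     total = 0
--     for digit, cnt in counts.items():
--         total += cnt * weight[digit]
--     return total
-- ===== Notes on version B (the rewrite author's own statement) =====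
-- stated objective: alternative
-- what changed: Replaces A's per-character two-accumulator loop over two dicts with an aggregate-then-weight scheme: build a frequency table of the digits, then sum count*weight over the distinct digits using one precomputed vertical-minus-horizontal weight dict.
import Mathlib
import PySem

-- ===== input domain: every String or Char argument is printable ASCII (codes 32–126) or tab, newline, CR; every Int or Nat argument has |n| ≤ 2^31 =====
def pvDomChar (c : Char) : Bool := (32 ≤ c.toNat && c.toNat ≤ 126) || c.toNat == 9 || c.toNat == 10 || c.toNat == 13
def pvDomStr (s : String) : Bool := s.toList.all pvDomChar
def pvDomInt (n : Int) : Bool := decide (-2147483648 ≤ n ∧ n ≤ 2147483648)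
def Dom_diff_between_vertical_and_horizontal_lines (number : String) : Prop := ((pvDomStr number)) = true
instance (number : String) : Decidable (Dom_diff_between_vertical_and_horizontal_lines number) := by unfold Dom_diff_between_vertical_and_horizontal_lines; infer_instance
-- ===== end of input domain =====

-- B replaces A's per-character two-sum loop by a frequency table (count each digit once,
-- then a weighted sum over distinct digits with one vertical-minus-horizontal weight dict);
-- same O(n) cost, different structure ("alternative").


-- ===== PORT A =====
def pvDictHori : PySem.Dict Char Int :=
  PySem.Dict.ofList [('0', 2), ('1', 0), ('2', 3), ('3', 3), ('4', 1), ('5', 3), ('6', 3), ('7', 1), ('8', 3), ('9', 3)]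
def pvDictVerti : PySem.Dict Char Int :=
  PySem.Dict.ofList [('0', 4), ('1', 2), ('2', 2), ('3', 2), ('4', 3), ('5', 2), ('6', 3), ('7', 2), ('8', 4), ('9', 3)]

-- Python's dict_hori[digit] raises KeyError on a non-digit char: those inputs are excluded
-- by Pre_; inside Pre_ every key is present, so getD _ 0 is exactly Python's lookup.
def diff_between_vertical_and_horizontal_lines (number : String) : Int :=
  let s := number.toList.foldl
    (fun (acc : Int × Int) digit =>
      (acc.1 + pvDictHori.getD digit 0, acc.2 + pvDictVerti.getD digit 0)) (0, 0)
  s.2 - s.1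

-- ===== PORT B =====
def pvWeight : PySem.Dict Char Int :=
  PySem.Dict.ofList [('0', 2), ('1', 2), ('2', -1), ('3', -1), ('4', 2), ('5', -1), ('6', 0), ('7', 1), ('8', 1), ('9', 0)]

-- weight[digit] raises KeyError on a non-digit char: excluded by Pre_, inside which getD _ 0 is exact.
def diff_between_vertical_and_horizontal_lines_alt (number : String) : Int :=
  let counts := number.toList.foldl (fun d x => d.insert x (d.getD x 0 + 1)) PySem.Dict.empty
  counts.items.foldl (fun total p => total + p.2 * pvWeight.getD p.1 0) 0

-- ===== PRECONDITION & SPEC =====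
-- Pre_ excludes exactly the inputs containing a non-digit character, on which both Pythons raise KeyError.
def Pre_diff_between_vertical_and_horizontal_lines (number : String) : Prop :=
  number.toList.all PySem.Chars.isdigit = true
instance (number : String) : Decidable (Pre_diff_between_vertical_and_horizontal_lines number) := by unfold Pre_diff_between_vertical_and_horizontal_lines; infer_instance
def pvWitness_diff_between_vertical_and_horizontal_lines : String := "021"

def Spec_diff_between_vertical_and_horizontal_lines (number : String) (out : Int) : Prop := out = diff_between_vertical_and_horizontal_lines_alt number
instance (number : String) (out : Int) : Decidable (Spec_diff_between_vertical_and_horizontal_lines number out) := by unfold Spec_diff_between_vertical_and_horizontal_lines; infer_instance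

-- ===== CLAIM (what is proved, stated in full; the proofs are below) =====
def Claim_equal_diff_between_vertical_and_horizontal_lines : Prop := ∀ (number : String), Dom_diff_between_vertical_and_horizontal_lines number → Pre_diff_between_vertical_and_horizontal_lines number → Spec_diff_between_vertical_and_horizontal_lines number (diff_between_vertical_and_horizontal_lines number)

-- ===== LEMMAS AND PROOFS =====

-- the per-digit weight is vertical minus horizontal — for EVERY char (off the key set both sides are 0)
set_option maxHeartbeats 1000000 in
lemma weight_eq (c : Char) : pvWeight.getD c 0 = pvDictVerti.getD c 0 - pvDictHori.getD c 0 := by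
  have hw : pvWeight = PySem.Dict.mk [('0', 2), ('1', 2), ('2', -1), ('3', -1), ('4', 2), ('5', -1), ('6', 0), ('7', 1), ('8', 1), ('9', 0)] := by decide
  have hv : pvDictVerti = PySem.Dict.mk [('0', 4), ('1', 2), ('2', 2), ('3', 2), ('4', 3), ('5', 2), ('6', 3), ('7', 2), ('8', 4), ('9', 3)] := by decide
  have hh : pvDictHori = PySem.Dict.mk [('0', 2), ('1', 0), ('2', 3), ('3', 3), ('4', 1), ('5', 3), ('6', 3), ('7', 1), ('8', 3), ('9', 3)] := by decide
  rw [hw, hv, hh]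
  simp only [PySem.Dict.getD_eq_get?_getD, PySem.Dict.get?_mk_cons]
  split_ifs <;> rfl

-- the weighted sum over the distinct elements with their multiplicities equals the plain sum
lemma sum_count_weight (w : Char → Int) (l : List Char) :
    ((PySem.Set.ofList l).map (fun k => (l.count k : Int) * w k)).sum = (l.map w).sum := by
  have hnd := PySem.Set.nodup_ofList (xs := l)
  have htf : (PySem.Set.ofList l).toFinset = l.toFinset := by
    ext x; simp [PySem.Set.mem_ofList]
  rw [← List.sum_toFinset _ hnd, htf, Finset.sum_list_map_count l w]
  simp

-- a sum of pointwise differences splits (not found in Mathlib/PySem in this sub form)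
lemma sum_map_sub_int (v h : Char → Int) (l : List Char) :
    (l.map (fun c => v c - h c)).sum = (l.map v).sum - (l.map h).sum := by
  induction l with
  | nil => simp
  | cons x t ih => simp [ih]; ring

-- ===== VERDICT (by name: the statement is the Claim_ definition above) =====
theorem diff_between_vertical_and_horizontal_lines_spec : Claim_equal_diff_between_vertical_and_horizontal_lines := by
  intro number _ _
  unfold Spec_diff_between_vertical_and_horizontal_lines
  show (number.toList.foldl
      (fun (acc : Int × Int) digit =>
        (acc.1 + pvDictHori.getD digit 0, acc.2 + pvDictVerti.getD digit 0)) (0, 0)).2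
      - (number.toList.foldl
      (fun (acc : Int × Int) digit =>
        (acc.1 + pvDictHori.getD digit 0, acc.2 + pvDictVerti.getD digit 0)) (0, 0)).1
    = (number.toList.foldl (fun d x => d.insert x (d.getD x 0 + 1)) PySem.Dict.empty).items.foldl
        (fun total p => total + p.2 * pvWeight.getD p.1 0) 0
  rw [PySem.List.foldl_prod_mk (f := fun acc d => acc + pvDictHori.getD d 0)
      (g := fun acc d => acc + pvDictVerti.getD d 0)]
  rw [PySem.Dict.foldl_insert_getD_add_one_eq_counter, PySem.Dict.items_counter]
  rw [PySem.List.foldl_add (g := fun p : Char × Int => p.2 * pvWeight.getD p.1 0)]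
  rw [PySem.List.foldl_add (g := fun d : Char => pvDictVerti.getD d 0)]
  rw [PySem.List.foldl_add (g := fun d : Char => pvDictHori.getD d 0)]
  simp only [List.map_map, Function.comp_def]
  rw [sum_count_weight (fun k => pvWeight.getD k 0)]
  simp only [weight_eq, sum_map_sub_int]
  ring
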